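-- pv_equiv track=rewrite | github.com/tonnetonne814/SiFi-VITS2-44100-Ja | data_utils.py | get_ph_pooling_dur
-- ===== SOURCE A (Python) =====
-- def get_ph_pooling_dur(ph_e, word_e):
--     out = list()
--     z_t = 0
--     word_idx = 0
--     for idx, e in enumerate(ph_e):
--         idx += 1
--         if word_e[word_idx] == e:
--             out.append(int(idx - z_t))
--             z_t = idx
--             word_idx += 1
--     return out
-- ===== SOURCE B (Python) =====
-- def get_ph_pooling_dur(ph_e, word_e):
--     # Word-driven decomposition: for each word-end energy, search for its next
--     # occurrence in ph_e from the current position; segment length = index+1-pos.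
--     out = []
--     pos = 0
--     for w in word_e:
--         try:
--             k = ph_e.index(w, pos)
--         except ValueError:
--             break
--         out.append(k + 1 - pos)
--         pos = k + 1
--     return out
-- ===== Notes on version B (the rewrite author's own statement) =====
-- stated objective: alternative
-- what changed: B inverts the traversal: instead of A's single Python-level pass over ph_e threading z_t and word_idx, B loops over word_e and for each word searches ph_e with list.index(w, pos) from the current position, emitting index+1-pos.
import Mathlib
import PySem

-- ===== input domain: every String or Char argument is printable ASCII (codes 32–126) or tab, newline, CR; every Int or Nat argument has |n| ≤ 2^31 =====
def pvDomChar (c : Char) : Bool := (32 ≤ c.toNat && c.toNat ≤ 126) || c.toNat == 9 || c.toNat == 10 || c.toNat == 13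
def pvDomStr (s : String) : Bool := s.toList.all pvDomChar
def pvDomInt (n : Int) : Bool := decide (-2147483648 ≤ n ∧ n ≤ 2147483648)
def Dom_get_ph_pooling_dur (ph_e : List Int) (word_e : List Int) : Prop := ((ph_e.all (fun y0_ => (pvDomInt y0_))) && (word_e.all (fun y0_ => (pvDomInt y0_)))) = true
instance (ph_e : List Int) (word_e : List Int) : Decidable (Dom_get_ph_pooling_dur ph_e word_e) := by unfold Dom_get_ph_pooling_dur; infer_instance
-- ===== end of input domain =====

-- B inverts the traversal: it loops over word_e and searches each word in the remaining
-- ph_e suffix (list.index), instead of A's single pass over ph_e threading z_t/word_idx.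
-- Both Pythons agree wherever A returns; A raises IndexError when word_e is exhausted
-- before the loop over ph_e ends, and Pre_ excludes exactly those inputs.

-- ===== PORT A =====
-- A's loop: state = (z_t, word_idx); emits idx - z_t at each match of word_e[word_idx]
def pvALoop (word_e : List Int) : List Int → Int → Int → Nat → List Int
  | [], _, _, _ => []
  | e :: rest, i, z_t, wi =>
    let idx := i + 1
    match word_e[wi]? with
    | none => []   -- Python raises IndexError here; Pre_ excludes these inputs
    | some w =>
      if w == e then
        (idx - z_t) :: pvALoop word_e rest idx idx (wi + 1)
      else
        pvALoop word_e rest idx z_t wi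

def get_ph_pooling_dur (ph_e : List Int) (word_e : List Int) : List Int :=
  pvALoop word_e ph_e 0 0 0

-- ===== PORT B =====
-- B's loop: for each word w, k = ph_e.index(w, pos); ValueError → break; else emit
-- k+1-pos and set pos = k+1.  ph_e.index(w, pos) has no PySem primitive; it is ported
-- by hand as pos + (first index of w in ph_e.drop pos), which is exactly Python's
-- first occurrence at an index ≥ pos.
def pvBLoop (ph_e : List Int) : List Int → Nat → List Int
  | [], _ => []
  | w :: ws, pos =>
    match PySem.List.index? (ph_e.drop pos) w with
    | none => []                          -- ValueError: break
    | some j =>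
      let k := pos + j
      (((k : Int) + 1) - (pos : Int)) :: pvBLoop ph_e ws (k + 1)

def get_ph_pooling_dur_alt (ph_e : List Int) (word_e : List Int) : List Int :=
  pvBLoop ph_e word_e 0

-- ===== PRECONDITION & SPEC =====
-- Scan deciding whether word_e is never exhausted while the loop over ph_e still runs
-- (otherwise Python's word_e[word_idx] raises IndexError).
def pvOkScan : List Int → List Int → Bool
  | [], _ => true
  | _ :: _, [] => false
  | e :: ph, w :: ws => if w == e then pvOkScan ph ws else pvOkScan ph (w :: ws)

-- Pre_ excludes exactly the inputs on which A raises IndexError (word_e exhausted mid-loop)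
def Pre_get_ph_pooling_dur (ph_e : List Int) (word_e : List Int) : Prop :=
  pvOkScan ph_e word_e = true

instance (ph_e : List Int) (word_e : List Int) : Decidable (Pre_get_ph_pooling_dur ph_e word_e) := by
  unfold Pre_get_ph_pooling_dur; infer_instance

def pvWitness_get_ph_pooling_dur : List Int × List Int := ([1, 2, 3, 5], [2, 5])

def Spec_get_ph_pooling_dur (ph_e : List Int) (word_e : List Int) (out : List Int) : Prop := out = get_ph_pooling_dur_alt ph_e word_e
instance (ph_e : List Int) (word_e : List Int) (out : List Int) : Decidable (Spec_get_ph_pooling_dur ph_e word_e out) := by unfold Spec_get_ph_pooling_dur; infer_instance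

-- ===== CLAIM =====
def Claim_equal_get_ph_pooling_dur : Prop := ∀ (ph_e : List Int) (word_e : List Int), Dom_get_ph_pooling_dur ph_e word_e → Pre_get_ph_pooling_dur ph_e word_e → Spec_get_ph_pooling_dur ph_e word_e (get_ph_pooling_dur ph_e word_e)

-- ===== LEMMAS AND PROOFS =====
-- proof-side helper: B's loop re-expressed on the remaining suffix instead of an index
def pvBSuf : List Int → List Int → List Int
  | [], _ => []
  | w :: ws, rest =>
    match PySem.List.index? rest w with
    | none => []
    | some k => ((k : Int) + 1) :: pvBSuf ws (rest.drop (k + 1))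

-- B's indexed loop equals the suffix-style loop on ph_e.drop pos
theorem pvBLoop_eq_suf (ph_e : List Int) :
    ∀ (ws : List Int) (pos : Nat), pvBLoop ph_e ws pos = pvBSuf ws (ph_e.drop pos) := by
  intro ws
  induction ws with
  | nil => intro pos; simp [pvBLoop, pvBSuf]
  | cons w ws' ih =>
    intro pos
    simp only [pvBLoop, pvBSuf]
    cases hk : PySem.List.index? (ph_e.drop pos) w with
    | none => simp
    | some j =>
      have hdrop : ph_e.drop (pos + j + 1) = (ph_e.drop pos).drop (j + 1) := by
        rw [List.drop_drop]; ring_nf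
      simp only [ih (pos + j + 1), hdrop]
      congr 1
      push_cast
      ring
-- Segment lemma: while word_e[wi] = w, A's scan over ph is the search for w:
-- no occurrence ⇒ [], first occurrence at k ⇒ emit (i+k+1 - z) and restart after it.
theorem pvALoop_seg (word_e : List Int) (w : Int) (ph : List Int) :
    ∀ (i z : Int) (wi : Nat), word_e[wi]? = some w →
      pvALoop word_e ph i z wi =
        match PySem.List.index? ph w with
        | none => []
        | some k => (i + (k : Int) + 1 - z) ::
            pvALoop word_e (ph.drop (k + 1)) (i + (k : Int) + 1) (i + (k : Int) + 1) (wi + 1) := by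
  induction ph with
  | nil => intro i z wi hw; simp [pvALoop, PySem.List.index?]
  | cons e rest ih =>
    intro i z wi hw
    by_cases he : e = w
    · subst he
      rw [PySem.List.index?_cons_self]
      simp [pvALoop, hw]
    · rw [PySem.List.index?_cons_of_ne rest he]
      have hA : pvALoop word_e (e :: rest) i z wi = pvALoop word_e rest (i + 1) z wi := by
        have hne : ¬ (w == e) = true := by
          intro h
          have hwe : w = e := by simpa using h
          exact he hwe.symm
        simp [pvALoop, hw, hne]
      rw [hA, ih (i + 1) z wi hw]
      cases hk : PySem.List.index? rest w with
      | none => simp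
      | some k =>
        simp [List.drop_succ_cons]
        constructor
        · ring
        · have : i + 1 + (k : Int) + 1 = i + ((k : Int) + 1) + 1 := by ring
          rw [this]

-- The Ok scan survives one segment: consuming the prefix up to the first occurrence of w
theorem pvOkScan_drop (w : Int) (ws : List Int) :
    ∀ (ph : List Int) (k : Nat), PySem.List.index? ph w = some k →
      pvOkScan ph (w :: ws) = true → pvOkScan (ph.drop (k + 1)) ws = true := by
  intro ph
  induction ph generalizing ws with
  | nil => intro k hk; simp [PySem.List.index?] at hk
  | cons e rest ih =>
    intro k hk hok
    by_cases he : e = w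
    · subst he
      rw [PySem.List.index?_cons_self] at hk
      cases hk
      simpa [pvOkScan] using hok
    · rw [PySem.List.index?_cons_of_ne rest he] at hk
      cases hk' : PySem.List.index? rest w with
      | none => rw [hk'] at hk; simp at hk
      | some k' =>
        rw [hk'] at hk
        simp at hk
        subst hk
        have hok' : pvOkScan rest (w :: ws) = true := by
          have hne : ¬ (w == e) = true := by
            intro h
            have hwe : w = e := by simpa using h
            exact he hwe.symm
          simpa [pvOkScan, hne] using hok
        simpa [List.drop_succ_cons] using ih ws k' hk' hok'

-- Main invariant: at a segment start (z = i) with words (word_e.drop wi) remaining,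
-- A's loop equals B's word-driven loop on the remaining phoneme suffix.
theorem pvLoop_eq (word_e : List Int) :
    ∀ (n : Nat) (ph : List Int), ph.length ≤ n → ∀ (i : Int) (wi : Nat),
      pvOkScan ph (word_e.drop wi) = true →
      pvALoop word_e ph i i wi = pvBSuf (word_e.drop wi) ph := by
  intro n
  induction n with
  | zero =>
    intro ph hlen i wi _
    have : ph = [] := List.eq_nil_of_length_eq_zero (Nat.le_zero.mp hlen)
    subst this
    cases word_e.drop wi <;> simp [pvALoop, pvBSuf]
  | succ n ih =>
    intro ph hlen i wi hok
    cases hws : word_e.drop wi with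
    | nil =>
      have hph : ph = [] := by
        cases ph with
        | nil => rfl
        | cons e rest => rw [hws] at hok; simp [pvOkScan] at hok
      subst hph
      simp [pvALoop, pvBSuf]
    | cons w ws =>
      have hw : word_e[wi]? = some w := by
        have h := List.getElem?_drop (xs := word_e) (i := wi) (j := 0)
        rw [hws] at h
        simpa using h.symm
      have hws' : word_e.drop (wi + 1) = ws := by
        have : word_e.drop (wi + 1) = (word_e.drop wi).drop 1 := by
          rw [← List.drop_drop]
        rw [this, hws]; rfl
      rw [pvALoop_seg word_e w ph i i wi hw]
      cases hk : PySem.List.index? ph w with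
      | none =>
        have hk' : List.idxOf? w ph = none := by
          rw [← PySem.List.index?_eq_idxOf?]; exact hk
        simp [pvBSuf, hk']
      | some k =>
        have hkl : k < ph.length := by
          rcases PySem.List.getElem_of_index?_eq_some hk with ⟨h, _⟩
          exact h
        have hok' : pvOkScan (ph.drop (k + 1)) ws = true := by
          rw [hws] at hok
          exact pvOkScan_drop w ws ph k hk hok
        have hlen' : (ph.drop (k + 1)).length ≤ n := by
          simp [List.length_drop]
          omega
        have hrec := ih (ph.drop (k + 1)) hlen' (i + (k : Int) + 1) (wi + 1) (by rw [hws']; exact hok')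
        rw [hws'] at hrec
        have hk' : List.idxOf? w ph = some k := by
          rw [← PySem.List.index?_eq_idxOf?]; exact hk
        simp [pvBSuf, hk', hrec]
        ring_nf

-- ===== VERDICT =====
theorem get_ph_pooling_dur_spec : Claim_equal_get_ph_pooling_dur := by
  intro ph_e word_e _ hpre
  unfold Spec_get_ph_pooling_dur get_ph_pooling_dur get_ph_pooling_dur_alt
  have h := pvLoop_eq word_e ph_e.length ph_e le_rfl 0 0 (by simpa using hpre)
  rw [pvBLoop_eq_suf]
  simpa using h
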